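-- pv_equiv track=rewrite | github.com/ryan-pelchat/problem_solutions | AddDocumentationWithTemplate/letterballoons.py | doesItFit
-- ===== SOURCE A (Python) =====
-- def doesItFit(combo, allowed_letters) -> bool:
--     setPool = set()
--     for tup in combo:
--         for charac in tup:
--             if charac not in allowed_letters:
--                 return False
--             if charac in setPool:
--                 return False
--             else:
--                 setPool.add(charac)
--     return True
-- ===== SOURCE B (Python) =====
-- def doesItFit(combo, allowed_letters) -> bool:
--     total = sum(len(tup) for tup in combo)
--     distinct_allowed = {c for tup in combo for c in tup if c in allowed_letters}
--     return len(distinct_allowed) == total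
-- ===== Notes on version B (the rewrite author's own statement) =====
-- stated objective: alternative
-- what changed: Replaces A's fused early-return loop with an incrementally grown seen-set by a single cardinality equation: the number of DISTINCT allowed characters equals the total character count, which holds exactly when every character is allowed and none repeats.
import Mathlib
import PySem

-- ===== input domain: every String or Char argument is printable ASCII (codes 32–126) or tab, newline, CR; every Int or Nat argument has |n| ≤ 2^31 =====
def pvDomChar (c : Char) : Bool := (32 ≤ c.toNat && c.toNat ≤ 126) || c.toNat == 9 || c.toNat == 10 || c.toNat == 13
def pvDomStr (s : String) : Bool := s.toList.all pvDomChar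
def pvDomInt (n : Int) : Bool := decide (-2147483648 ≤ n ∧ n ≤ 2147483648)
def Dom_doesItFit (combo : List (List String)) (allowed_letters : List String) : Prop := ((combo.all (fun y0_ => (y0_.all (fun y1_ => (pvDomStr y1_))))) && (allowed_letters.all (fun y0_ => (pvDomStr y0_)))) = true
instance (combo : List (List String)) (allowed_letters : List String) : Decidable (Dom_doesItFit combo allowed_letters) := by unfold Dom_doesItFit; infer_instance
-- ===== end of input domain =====

-- B replaces A's fused early-return loop with a single cardinality equation
-- (distinct allowed characters = total character count); objective: alternative.

-- ===== PORT A =====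
-- inner 'for charac in tup' loop: none = an early 'return False', some pool = loop finished
def pvInnerA (allowed_letters : List String) : List String → PySem.Set String → Option (PySem.Set String)
  | [], pool => some pool
  | c :: cs, pool =>
    if c ∈ allowed_letters then
      if PySem.Set.contains pool c then none
      else pvInnerA allowed_letters cs (PySem.Set.add pool c)
    else none

-- outer 'for tup in combo' loop
def pvOuterA (allowed_letters : List String) : List (List String) → PySem.Set String → Bool
  | [], _ => true
  | t :: ts, pool =>
    match pvInnerA allowed_letters t pool with
    | none => false
    | some pool' => pvOuterA allowed_letters ts pool'

def doesItFit (combo : List (List String)) (allowed_letters : List String) : Bool :=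
  pvOuterA allowed_letters combo PySem.Set.empty

-- ===== PORT B =====
def doesItFit_alt (combo : List (List String)) (allowed_letters : List String) : Bool :=
  let total := (combo.map (fun tup => tup.length)).sum
  let distinct_allowed :=
    PySem.Set.ofList ((combo.flatMap (fun tup => tup)).filter (fun c => decide (c ∈ allowed_letters)))
  distinct_allowed.length == total

-- ===== PRECONDITION & SPEC =====
def Spec_doesItFit (combo : List (List String)) (allowed_letters : List String) (out : Bool) : Prop := out = doesItFit_alt combo allowed_letters
instance (combo : List (List String)) (allowed_letters : List String) (out : Bool) : Decidable (Spec_doesItFit combo allowed_letters out) := by unfold Spec_doesItFit; infer_instance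

-- ===== CLAIM (what is proved, stated in full; the proofs are below) =====
def Claim_equal_doesItFit : Prop := ∀ (combo : List (List String)) (allowed_letters : List String), Dom_doesItFit combo allowed_letters → Spec_doesItFit combo allowed_letters (doesItFit combo allowed_letters)

-- ===== LEMMAS AND PROOFS =====

-- A's two nested loops, linearised over the flattened character list
def pvLin (allowed_letters : List String) : List String → PySem.Set String → Bool
  | [], _ => true
  | c :: cs, pool =>
    if c ∈ allowed_letters then
      if PySem.Set.contains pool c then false
      else pvLin allowed_letters cs (PySem.Set.add pool c)
    else false

theorem pvLin_append (a : List String) (t rest : List String) (pool : PySem.Set String) :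
    pvLin a (t ++ rest) pool =
      (match pvInnerA a t pool with
       | none => false
       | some pool' => pvLin a rest pool') := by
  induction t generalizing pool with
  | nil => simp [pvInnerA]
  | cons c cs ih =>
    simp only [List.cons_append, pvLin, pvInnerA]
    split_ifs <;> simp [ih]

theorem outer_eq_lin (a : List String) (combo : List (List String)) (pool : PySem.Set String) :
    pvOuterA a combo pool = pvLin a (combo.flatMap (fun tup => tup)) pool := by
  induction combo generalizing pool with
  | nil => simp [pvOuterA, pvLin]
  | cons t ts ih =>
    simp only [List.flatMap_cons, pvOuterA, pvLin_append]
    cases h : pvInnerA a t pool <;> simp [ih]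

theorem set_add_length_le (pool : PySem.Set String) (c : String) :
    (PySem.Set.add pool c).length ≤ pool.length + 1 := by
  simp only [PySem.Set.add]
  split_ifs <;> simp

theorem set_update_length_le (cs : List String) (pool : PySem.Set String) :
    (PySem.Set.update pool cs).length ≤ pool.length + cs.length := by
  induction cs generalizing pool with
  | nil => simp [PySem.Set.update]
  | cons c cs ih =>
    have h1 := set_add_length_le pool c
    have h2 := ih (PySem.Set.add pool c)
    simp only [PySem.Set.update, List.foldl_cons, List.length_cons]
    simp only [PySem.Set.update] at h2
    omega

-- pvLin over cs starting from pool succeeds iff growing pool by the ALLOWED characters of cs,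
-- deduplicated, gains exactly cs.length new elements
theorem lin_eq_card (a : List String) (cs : List String) (pool : PySem.Set String) :
    pvLin a cs pool =
      ((PySem.Set.update pool (cs.filter (fun c => decide (c ∈ a)))).length == pool.length + cs.length) := by
  induction cs generalizing pool with
  | nil => simp [pvLin, PySem.Set.update]
  | cons c cs ih =>
    simp only [pvLin, List.filter_cons]
    by_cases hm : c ∈ a
    · by_cases hcm : c ∈ pool
      · have hadd : PySem.Set.add pool c = pool := by simp [PySem.Set.add, hcm]
        have hle := set_update_length_le (cs.filter (fun c => decide (c ∈ a))) pool
        have hfl : (cs.filter (fun c => decide (c ∈ a))).length ≤ cs.length := List.length_filter_le _ _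
        have hfalse : ((PySem.Set.update pool (c :: cs.filter (fun c => decide (c ∈ a)))).length
            == pool.length + (cs.length + 1)) = false := by
          simp only [PySem.Set.update, List.foldl_cons, hadd] at *
          simp only [beq_eq_false_iff_ne]
          omega
        simp [hm, hcm, PySem.Set.update] at *
        omega
      · have hadd : PySem.Set.add pool c = pool ++ [c] := by simp [PySem.Set.add, hcm]
        have hih := ih (PySem.Set.add pool c)
        simp only [hadd, List.length_append, List.length_cons, List.length_nil] at hih
        have he : pool.length + 1 + cs.length = pool.length + (cs.length + 1) := by omega
        simp [hm, hcm, PySem.Set.update, List.foldl_cons] at *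
        rw [hih, he]
    · have hle := set_update_length_le (cs.filter (fun c => decide (c ∈ a))) pool
      have hfl : (cs.filter (fun c => decide (c ∈ a))).length ≤ cs.length := List.length_filter_le _ _
      have hfalse : ((PySem.Set.update pool (cs.filter (fun c => decide (c ∈ a)))).length
          == pool.length + (cs.length + 1)) = false := by
        simp only [beq_eq_false_iff_ne]
        omega
      simp [hm, hfalse]

-- ===== VERDICT (by name: the statement is the Claim_ definition above) =====
theorem doesItFit_spec : Claim_equal_doesItFit := by
  intro combo allowed_letters _
  unfold Spec_doesItFit doesItFit doesItFit_alt
  rw [outer_eq_lin, lin_eq_card]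
  simp [PySem.Set.ofList_eq_foldl, PySem.Set.update, PySem.Set.empty]
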